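-- pv_equiv track=rewrite | github.com/chenlum/Indexing-and-Query | chenlum_p1.py | get_title_lines
-- ===== SOURCE A (Python) =====
-- def get_title_lines(titles, lines):
--     title_lines = list()
--     line_num = 124
--     for line in lines:
--         line_num += 1
--         for title in titles:
--             if line.strip() == title:
--                 title_lines.append(line_num)
--     return title_lines
-- ===== SOURCE B (Python) =====
-- def get_title_lines(titles, lines):
--     index = {}
--     line_num = 124
--     for line in lines:
--         line_num += 1
--         index.setdefault(line.strip(), []).append(line_num)
--     title_lines = []
--     for title in titles:
--         title_lines.extend(index.get(title, []))
--     title_lines.sort()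
--     return title_lines
-- ===== Notes on version B (the rewrite author's own statement) =====
-- stated objective: alternative
-- what changed: Inverts the traversal: one pass over lines builds an inverted index from stripped text to its ascending line numbers, then the matches gathered per title are sorted back into line order, replacing A's per-line scan over titles.
import Mathlib
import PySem

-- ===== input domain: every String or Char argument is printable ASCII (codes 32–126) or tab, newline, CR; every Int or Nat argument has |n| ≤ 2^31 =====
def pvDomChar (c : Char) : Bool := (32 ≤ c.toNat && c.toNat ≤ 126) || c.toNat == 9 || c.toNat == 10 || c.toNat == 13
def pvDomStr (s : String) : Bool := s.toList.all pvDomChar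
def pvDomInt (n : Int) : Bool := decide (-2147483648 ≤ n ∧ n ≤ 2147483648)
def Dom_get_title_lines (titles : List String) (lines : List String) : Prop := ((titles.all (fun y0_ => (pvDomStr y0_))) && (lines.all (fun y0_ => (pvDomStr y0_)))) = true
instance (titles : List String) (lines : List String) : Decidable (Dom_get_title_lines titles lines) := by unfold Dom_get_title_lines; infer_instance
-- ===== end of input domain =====

-- B inverts the traversal: it builds an inverted index (stripped line text → ascending line
-- numbers) in one pass over lines, gathers each title's matches from it and sorts the result
-- back into line order, instead of A's per-line scan over titles (objective: alternative).
-- ===== PORT A =====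
def get_title_lines (titles : List String) (lines : List String) : List Int :=
  (lines.foldl (fun (st : List Int × Int) line =>
      let line_num := st.2 + 1
      (titles.foldl (fun acc title =>
          if PySem.Str.strip line == title then acc ++ [line_num] else acc) st.1,
       line_num))
    (([] : List Int), (124 : Int))).1

-- ===== PORT B =====
def get_title_lines_alt (titles : List String) (lines : List String) : List Int :=
  let index : PySem.Dict String (List Int) :=
    (lines.foldl (fun (st : PySem.Dict String (List Int) × Int) line =>
        let line_num := st.2 + 1
        (st.1.modify (PySem.Str.strip line) [] (· ++ [line_num]), line_num))
      (PySem.Dict.empty, (124 : Int))).1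
  let title_lines : List Int :=
    titles.foldl (fun acc title => acc ++ index.getD title []) []
  PySem.List.sorted title_lines (fun x => x) false

-- ===== PRECONDITION & SPEC =====
def Spec_get_title_lines (titles : List String) (lines : List String) (out : List Int) : Prop := out = get_title_lines_alt titles lines
instance (titles : List String) (lines : List String) (out : List Int) : Decidable (Spec_get_title_lines titles lines out) := by unfold Spec_get_title_lines; infer_instance

-- ===== CLAIM (what is proved, stated in full; the proofs are below) =====
def Claim_equal_get_title_lines : Prop := ∀ (titles : List String) (lines : List String), Dom_get_title_lines titles lines → Spec_get_title_lines titles lines (get_title_lines titles lines)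

-- ===== LEMMAS AND PROOFS =====

-- the ascending line numbers (from n) of the lines whose stripped text equals t
def posFrom (t : String) (n : Int) : List String → List Int
  | [] => []
  | l :: ls => (if PySem.Str.strip l = t then [n] else []) ++ posFrom t (n + 1) ls

-- A's output written structurally: per line, its number repeated count-in-titles times
def outFrom (titles : List String) (n : Int) : List String → List Int
  | [] => []
  | l :: ls => List.replicate (titles.count (PySem.Str.strip l)) n ++ outFrom titles (n + 1) ls

lemma inner_eq (titles : List String) (s : String) (acc : List Int) (n : Int) :
    titles.foldl (fun acc title => if s == title then acc ++ [n] else acc) acc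
      = acc ++ List.replicate (titles.count s) n := by
  induction titles generalizing acc with
  | nil => simp
  | cons t ts ih =>
    simp only [List.foldl_cons, List.count_cons, ih]
    by_cases h : s = t
    · simp [h, List.replicate_succ']
      rw [← List.replicate_succ, List.replicate_succ']
    · have h2 : (s == t) = false := by simp [h]
      have h3 : (t == s) = false := by simp [Ne.symm h]
      simp [h2, h3]

lemma A_eq (titles lines : List String) (acc : List Int) (n : Int) :
    (lines.foldl (fun (st : List Int × Int) line =>
        let line_num := st.2 + 1
        (titles.foldl (fun acc title =>
            if PySem.Str.strip line == title then acc ++ [line_num] else acc) st.1,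
         line_num)) (acc, n)).1
      = acc ++ outFrom titles (n + 1) lines := by
  induction lines generalizing acc n with
  | nil => simp [outFrom]
  | cons l ls ih =>
    simp only [List.foldl_cons]
    rw [inner_eq, ih, outFrom]
    simp

lemma index_getD (lines : List String) (d : PySem.Dict String (List Int)) (n : Int) (t : String) :
    ((lines.foldl (fun (st : PySem.Dict String (List Int) × Int) line =>
        let line_num := st.2 + 1
        (st.1.modify (PySem.Str.strip line) [] (· ++ [line_num]), line_num))
      (d, n)).1).getD t []
      = d.getD t [] ++ posFrom t (n + 1) lines := by
  induction lines generalizing d n with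
  | nil => simp [posFrom]
  | cons l ls ih =>
    simp only [List.foldl_cons]
    rw [ih, posFrom, PySem.Dict.getD_modify]
    by_cases h : t = PySem.Str.strip l
    · simp [h]
    · simp [h, Ne.symm h]

lemma flatMap_append_perm {α β : Type} (ts : List α) (f g : α → List β) :
    (ts.flatMap (fun t => f t ++ g t)).Perm (ts.flatMap f ++ ts.flatMap g) := by
  induction ts with
  | nil => simp
  | cons t ts ih =>
    simp only [List.flatMap_cons]
    refine (ih.append_left (f t ++ g t)).trans ?_
    have key : (g t ++ ts.flatMap f).Perm (ts.flatMap f ++ g t) := List.perm_append_comm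
    have h2 := (key.append_left (f t)).append_right (ts.flatMap g)
    simpa [List.append_assoc] using h2

lemma flatMap_hit (titles : List String) (s : String) (n : Int) :
    titles.flatMap (fun t => if s = t then [n] else [])
      = List.replicate (titles.count s) n := by
  induction titles with
  | nil => simp
  | cons t ts ih =>
    simp only [List.flatMap_cons, List.count_cons, ih]
    by_cases h : s = t
    · simp [h, List.replicate_succ]
    · have h3 : (t == s) = false := by simp [Ne.symm h]
      simp [h, h3]

lemma perm_main (titles lines : List String) (n : Int) :
    (titles.flatMap (fun t => posFrom t n lines)).Perm (outFrom titles n lines) := by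
  induction lines generalizing n with
  | nil => simp [posFrom, outFrom]
  | cons l ls ih =>
    simp only [posFrom, outFrom]
    refine (flatMap_append_perm titles _ _).trans ?_
    rw [flatMap_hit]
    exact List.Perm.append_left _ (ih (n + 1))

lemma mem_outFrom {titles lines : List String} {n x : Int}
    (h : x ∈ outFrom titles n lines) : n ≤ x := by
  induction lines generalizing n with
  | nil => simp [outFrom] at h
  | cons l ls ih =>
    simp only [outFrom, List.mem_append] at h
    rcases h with h | h
    · rw [List.eq_of_mem_replicate h]
    · exact le_trans (by omega) (ih h)

lemma outFrom_pairwise (titles lines : List String) (n : Int) :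
    (outFrom titles n lines).Pairwise (· ≤ ·) := by
  induction lines generalizing n with
  | nil => simp [outFrom]
  | cons l ls ih =>
    simp only [outFrom]
    refine List.pairwise_append.mpr ⟨List.pairwise_replicate.mpr (Or.inr le_rfl), ih (n + 1), ?_⟩
    intro a ha b hb
    rw [List.eq_of_mem_replicate ha]
    exact le_trans (by omega) (mem_outFrom hb)

-- ===== VERDICT (by name: the statement is the Claim_ definition above) =====
theorem get_title_lines_spec : Claim_equal_get_title_lines := by
  intro titles lines _
  unfold Spec_get_title_lines get_title_lines get_title_lines_alt
  rw [A_eq]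
  simp only [List.nil_append]
  have hidx : ∀ t, (((lines.foldl (fun (st : PySem.Dict String (List Int) × Int) line =>
      let line_num := st.2 + 1
      (st.1.modify (PySem.Str.strip line) [] (· ++ [line_num]), line_num))
      (PySem.Dict.empty, (124 : Int))).1).getD t []) = posFrom t 125 lines := by
    intro t
    rw [index_getD]
    simp [PySem.Dict.getD, PySem.Dict.get?, PySem.Dict.empty]
  rw [PySem.List.foldl_append_eq_flatMap]
  simp only [List.nil_append, hidx]
  exact (PySem.List.sorted_id_eq_of_perm_of_pairwise _ _
    (perm_main titles lines 125).symm (outFrom_pairwise titles lines 125)).symm
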